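-- pv_equiv track=rewrite | github.com/buyinakili/AxiomOS-Labs | infrastructure/translator/pddl_translator.py | _build_objects_section
-- ===== SOURCE A (Python) =====
-- from typing import Set, Dict, List, Optional
--
-- def _build_objects_section(objects: Dict[str, str]) -> str:
--     """
--     构建PDDL objects部分
--
--     :param objects: 对象字典
--     :return: objects部分字符串
--     """
--     if not objects:
--         return ""
--     # 按类型分组
--     type_to_objs = {}
--     for obj, typ in objects.items():
--         type_to_objs.setdefault(typ, []).append(obj)
--     lines = []
--     for typ, objs_list in type_to_objs.items():
--         line = " ".join(objs_list) + " - " + typ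
--         lines.append(line)
--     return "\n    ".join(lines)
-- ===== SOURCE B (Python) =====
-- def _build_objects_section(objects):
--     """
--     构建PDDL objects部分 — same result via ordered distinct types + one scan per type.
--     """
--     if not objects:
--         return ""
--     types = dict.fromkeys(objects.values())
--     return "\n    ".join(
--         " ".join(o for o, t in objects.items() if t == typ) + " - " + typ
--         for typ in types
--     )
-- ===== Notes on version B (the rewrite author's own statement) =====
-- stated objective: alternative
-- what changed: A builds a type->objects index in one pass with setdefault/append and then walks the index; B first computes the distinct types in first-appearance order (dict.fromkeys) and then builds each line by re-scanning the items for that type, with no index dict at all.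
import Mathlib
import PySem

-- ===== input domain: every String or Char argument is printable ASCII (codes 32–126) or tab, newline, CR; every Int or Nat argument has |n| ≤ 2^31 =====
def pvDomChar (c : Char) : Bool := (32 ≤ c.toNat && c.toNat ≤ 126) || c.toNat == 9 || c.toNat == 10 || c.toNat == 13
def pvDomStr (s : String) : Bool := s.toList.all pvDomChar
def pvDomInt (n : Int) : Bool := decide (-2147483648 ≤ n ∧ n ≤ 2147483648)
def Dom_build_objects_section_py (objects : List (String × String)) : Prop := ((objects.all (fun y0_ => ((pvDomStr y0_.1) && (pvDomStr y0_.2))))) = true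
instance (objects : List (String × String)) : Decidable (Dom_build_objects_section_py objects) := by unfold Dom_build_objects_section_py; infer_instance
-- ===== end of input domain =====

-- B replaces A's setdefault-index single pass by ordered distinct types + one scan per type (alternative decomposition, same result).
-- ===== PORT A =====
def build_objects_section_py (objects : List (String × String)) : String :=
  if objects.isEmpty then ""
  else
    -- for obj, typ in objects.items(): type_to_objs.setdefault(typ, []).append(obj)
    let type_to_objs : PySem.Dict String (List String) :=
      objects.foldl (fun d p => d.modify p.2 [] (fun l => l ++ [p.1])) PySem.Dict.empty
    -- for typ, objs_list in type_to_objs.items(): lines.append(" ".join(objs_list) + " - " + typ)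
    let lines : List String :=
      type_to_objs.items.foldl (fun acc p => acc ++ [PySem.Str.join " " p.2 ++ " - " ++ p.1]) []
    PySem.Str.join "\n    " lines

-- ===== PORT B =====
def build_objects_section_py_alt (objects : List (String × String)) : String :=
  if objects.isEmpty then ""
  else
    -- types = dict.fromkeys(objects.values())
    let types : List String := PySem.List.dedup (objects.map Prod.snd)
    -- one line per type: join the objects whose type matches
    PySem.Str.join "\n    " (types.map (fun typ =>
      PySem.Str.join " " ((objects.filter (fun p => p.2 == typ)).map Prod.fst) ++ " - " ++ typ))

-- ===== PRECONDITION & SPEC =====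
def Spec_build_objects_section_py (objects : List (String × String)) (out : String) : Prop := out = build_objects_section_py_alt objects
instance (objects : List (String × String)) (out : String) : Decidable (Spec_build_objects_section_py objects out) := by unfold Spec_build_objects_section_py; infer_instance

-- ===== CLAIM (what is proved, stated in full; the proofs are below) =====
def Claim_equal_build_objects_section_py : Prop := ∀ (objects : List (String × String)), Dom_build_objects_section_py objects → Spec_build_objects_section_py objects (build_objects_section_py objects)

-- ===== LEMMAS AND PROOFS =====

-- ===== VERDICT (by name: the statement is the Claim_ definition above) =====
theorem build_objects_section_py_spec : Claim_equal_build_objects_section_py := by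
  intro objects _
  unfold Spec_build_objects_section_py build_objects_section_py build_objects_section_py_alt
  by_cases h : objects.isEmpty
  · simp [h]
  · simp only [h]
    have hfold : objects.foldl (fun d p => d.modify p.2 [] (fun l => l ++ [p.1]))
        (PySem.Dict.empty : PySem.Dict String (List String))
        = (objects.map Prod.swap).foldl (fun d p => d.modify p.1 [] (fun l => l ++ [p.2]))
        PySem.Dict.empty := by
      rw [List.foldl_map]; rfl
    have hnd : (objects.foldl (fun d p => d.modify p.2 [] (fun l => l ++ [p.1]))
        (PySem.Dict.empty : PySem.Dict String (List String))).keys.Nodup := by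
      exact PySem.Dict.nodup_keys_foldl_modify_key objects Prod.snd []
        (fun d p => fun l => l ++ [p.1]) _ (by simp)
    have hkeys : (objects.foldl (fun d p => d.modify p.2 [] (fun l => l ++ [p.1]))
        (PySem.Dict.empty : PySem.Dict String (List String))).keys
        = PySem.List.dedup (objects.map Prod.snd) := by
      rw [PySem.Dict.keys_foldl_modify_key]
      simp [PySem.Set.update, PySem.Set.ofList_eq_foldl]
    rw [PySem.List.foldl_append_singleton_eq_map,
      PySem.Dict.items_eq_map_keys _ hnd [], hkeys, List.map_map]
    simp only [Bool.false_eq_true, if_false, List.nil_append]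
    apply congrArg
    apply List.map_congr_left
    intro t _
    simp only [Function.comp]
    congr 2
    rw [hfold, PySem.Dict.getD_foldl_modify_append, PySem.Dict.getD_empty, List.nil_append,
      List.filter_map, List.map_map]
    simp [Function.comp_def]
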